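-- pv_equiv track=rewrite | github.com/Pave1P/diskret | 2/5.py | count_paths_no_consecutive_vertical
-- ===== SOURCE A (Python) =====
-- def count_paths_no_consecutive_vertical(m, n):
--     dp = [[[0] * 2 for _ in range(n + 1)] for _ in range(m + 1)]
--     dp[0][0][0] = 1
--     for i in range(m + 1):
--         for j in range(n + 1):
--             if i > 0:
--                 dp[i][j][0] += dp[i - 1][j][0] + dp[i - 1][j][1]
--             if j > 0:
--                 dp[i][j][1] += dp[i][j - 1][0]
--     return dp[m][n][0] + dp[m][n][1]
-- ===== SOURCE B (Python) =====
-- def count_paths_no_consecutive_vertical(m, n):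
--     # Closed form: the answer is C(m+1, n), computed multiplicatively in O(n).
--     res = 1
--     for k in range(n):
--         res = res * (m + 1 - k) // (k + 1)
--     return res
-- ===== Notes on version B (the rewrite author's own statement) =====
-- stated objective: faster
-- what changed: Replaced the O(m*n) dynamic-programming table by the closed-form binomial coefficient C(m+1, n), computed multiplicatively in a single O(n) loop.
import Mathlib
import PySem

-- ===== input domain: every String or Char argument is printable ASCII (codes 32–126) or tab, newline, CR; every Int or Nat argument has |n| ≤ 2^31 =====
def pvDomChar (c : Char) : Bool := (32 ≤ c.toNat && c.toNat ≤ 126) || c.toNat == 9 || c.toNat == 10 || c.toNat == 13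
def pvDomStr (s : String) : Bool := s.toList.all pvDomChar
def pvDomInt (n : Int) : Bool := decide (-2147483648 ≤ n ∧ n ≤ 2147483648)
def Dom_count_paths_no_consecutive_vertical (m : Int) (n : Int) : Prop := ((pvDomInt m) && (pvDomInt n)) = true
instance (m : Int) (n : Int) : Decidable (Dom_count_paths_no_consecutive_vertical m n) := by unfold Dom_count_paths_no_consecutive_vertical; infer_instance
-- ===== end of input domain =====

-- B replaces A's O(m*n) dynamic-programming table by the closed-form binomial C(m+1, n),
-- computed multiplicatively in O(n): faster (asymptotic).

-- ===== PORT A =====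
-- dp[i][j][k] read / write on the nested-list table (Python list indexing with in-range Nat indices)
def pvGet3 (dp : List (List (List Int))) (i j k : Nat) : Int :=
  ((dp.getD i []).getD j []).getD k 0

def pvSet3 (dp : List (List (List Int))) (i j k : Nat) (v : Int) : List (List (List Int)) :=
  dp.set i ((dp.getD i []).set j (((dp.getD i []).getD j []).set k v))

def count_paths_no_consecutive_vertical (m : Int) (n : Int) : Int :=
  let dp0 := List.replicate (m + 1).toNat (List.replicate (n + 1).toNat ([0, 0] : List Int))
  let dp1 := pvSet3 dp0 0 0 0 1
  let dp2 := (PySem.List.pyRange 0 (m + 1) 1).foldl (fun dp i =>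
    (PySem.List.pyRange 0 (n + 1) 1).foldl (fun dp j =>
      let dp := if 0 < i then
          pvSet3 dp i.toNat j.toNat 0
            (pvGet3 dp i.toNat j.toNat 0 +
              (pvGet3 dp (i - 1).toNat j.toNat 0 + pvGet3 dp (i - 1).toNat j.toNat 1))
        else dp
      if 0 < j then
          pvSet3 dp i.toNat j.toNat 1
            (pvGet3 dp i.toNat j.toNat 1 + pvGet3 dp i.toNat (j - 1).toNat 0)
        else dp) dp) dp1
  pvGet3 dp2 m.toNat n.toNat 0 + pvGet3 dp2 m.toNat n.toNat 1

-- ===== PORT B =====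
def count_paths_no_consecutive_vertical_alt (m : Int) (n : Int) : Int :=
  (PySem.List.pyRange 0 n 1).foldl
    (fun res k => PySem.Int.floordiv (res * (m + 1 - k)) (k + 1)) 1

-- ===== PRECONDITION & SPEC =====
-- Pre_ excludes m < 0 or n < 0, where A raises IndexError (dp[0][0][0] on an empty table).
def Pre_count_paths_no_consecutive_vertical (m : Int) (n : Int) : Prop := 0 ≤ m ∧ 0 ≤ n
instance (m : Int) (n : Int) : Decidable (Pre_count_paths_no_consecutive_vertical m n) := by
  unfold Pre_count_paths_no_consecutive_vertical; infer_instance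

def pvWitness_count_paths_no_consecutive_vertical : Int × Int := (2, 3)

def Spec_count_paths_no_consecutive_vertical (m : Int) (n : Int) (out : Int) : Prop :=
  out = count_paths_no_consecutive_vertical_alt m n
instance (m : Int) (n : Int) (out : Int) : Decidable (Spec_count_paths_no_consecutive_vertical m n out) := by
  unfold Spec_count_paths_no_consecutive_vertical; infer_instance

-- ===== CLAIM (what is proved, stated in full; the proofs are below) =====
def Claim_equal_count_paths_no_consecutive_vertical : Prop := ∀ (m : Int) (n : Int), Dom_count_paths_no_consecutive_vertical m n → Pre_count_paths_no_consecutive_vertical m n → Spec_count_paths_no_consecutive_vertical m n (count_paths_no_consecutive_vertical m n)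

-- ===== LEMMAS AND PROOFS =====

-- the final value of cell (i, j) of A's table: [C(i, j), C(i, j-1)] (second entry 0 at j = 0)
def pvCellF (i j : Nat) : List Int :=
  [(i.choose j : Int), if j = 0 then 0 else (i.choose (j - 1) : Int)]

-- the initial value of cell (i, j) (after dp[0][0][0] = 1)
def pvCell0 (i j : Nat) : List Int := if i = 0 ∧ j = 0 then [1, 0] else [0, 0]

-- the table after the cells before (t, s) (row-major) have been processed
-- cell (i, j) of the table when the cells before (t, s) in row-major order are done
def pvF (t s i j : Nat) : List Int :=
  if i < t ∨ (i = t ∧ j < s) then pvCellF i j else pvCell0 i j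

def pvState (M N t s : Nat) : List (List (List Int)) :=
  (List.range M).map (fun i => (List.range N).map (pvF t s i))

-- the body of A's inner loop, named so the step lemma can speak about it (defeq to the port's lambda)
def pvBody (dp : List (List (List Int))) (i j : Int) : List (List (List Int)) :=
  let dp := if 0 < i then
      pvSet3 dp i.toNat j.toNat 0
        (pvGet3 dp i.toNat j.toNat 0 +
          (pvGet3 dp (i - 1).toNat j.toNat 0 + pvGet3 dp (i - 1).toNat j.toNat 1))
    else dp
  if 0 < j then
      pvSet3 dp i.toNat j.toNat 1
        (pvGet3 dp i.toNat j.toNat 1 + pvGet3 dp i.toNat (j - 1).toNat 0)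
    else dp

theorem pvGet3_map (M N : Nat) (F : Nat → Nat → List Int) (i j k : Nat)
    (hi : i < M) (hj : j < N) :
    pvGet3 ((List.range M).map (fun i' => (List.range N).map (F i'))) i j k
      = (F i j).getD k 0 := by
  simp [pvGet3, List.getD_eq_getElem?_getD, hi, hj]

theorem pvSet3_map (M N : Nat) (F : Nat → Nat → List Int) (i j k : Nat) (v : Int)
    (hi : i < M) (hj : j < N) :
    pvSet3 ((List.range M).map (fun i' => (List.range N).map (F i'))) i j k v
      = (List.range M).map (fun i' => (List.range N).map (fun j' =>
          if i' = i ∧ j' = j then (F i j).set k v else F i' j')) := by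
  have hgd : ((List.range M).map (fun i' => (List.range N).map (F i'))).getD i []
      = (List.range N).map (F i) := by
    simp [List.getD_eq_getElem?_getD, hi]
  have hgd2 : ((List.range N).map (F i)).getD j [] = F i j := by
    simp [List.getD_eq_getElem?_getD, hj]
  have hA : pvSet3 ((List.range M).map (fun i' => (List.range N).map (F i'))) i j k v
      = ((List.range M).map (fun i' => (List.range N).map (F i'))).set i
          (((List.range N).map (F i)).set j ((F i j).set k v)) := by
    unfold pvSet3; rw [hgd, hgd2]
  rw [hA]
  apply List.ext_getElem
  · simp
  · intro a h1 h2
    simp only [List.length_set, List.length_map, List.length_range] at h1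
    by_cases hai : a = i
    · subst hai
      rw [List.getElem_set_self (by simpa using hi)]
      apply List.ext_getElem
      · simp
      · intro b hb1 hb2
        simp only [List.length_set, List.length_map, List.length_range] at hb1
        by_cases hbj : b = j
        · subst hbj
          rw [List.getElem_set_self (by simpa using hj)]
          simp
        · rw [List.getElem_set_ne (by omega)]
          simp [hbj]
    · rw [List.getElem_set_ne (by omega)]
      simp only [List.getElem_map, List.getElem_range]
      apply List.map_congr_left
      intro x hx
      simp [hai]

-- the two states a cell step distinguishes agree pointwise, lifted to table equality
theorem pvState_congr (M N t s t' s' : Nat)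
    (h : ∀ i j, i < M → j < N → pvF t s i j = pvF t' s' i j) :
    pvState M N t s = pvState M N t' s' := by
  unfold pvState
  apply List.map_congr_left
  intro i hi
  apply List.map_congr_left
  intro j hj
  exact h i j (List.mem_range.mp hi) (List.mem_range.mp hj)

theorem pvInit_eq (M N : Nat) (hM : 0 < M) (hN : 0 < N) :
    pvSet3 (List.replicate M (List.replicate N ([0, 0] : List Int))) 0 0 0 1
      = pvState M N 0 0 := by
  have h1 : List.replicate M (List.replicate N ([0, 0] : List Int))
      = (List.range M).map (fun _ => (List.range N).map (fun _ => ([0, 0] : List Int))) := by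
    simp [List.map_const']
  rw [h1, pvSet3_map M N (fun _ _ => ([0, 0] : List Int)) 0 0 0 1 hM hN]
  unfold pvState
  apply List.map_congr_left
  intro i hi
  apply List.map_congr_left
  intro j hj
  by_cases h : i = 0 ∧ j = 0 <;> simp [pvF, pvCell0, h]


theorem pvF_final (t s i j : Nat) (h : i < t ∨ (i = t ∧ j < s)) :
    pvF t s i j = pvCellF i j := by
  unfold pvF; rw [if_pos h]

theorem pvF_succ_of_ne (t s i j : Nat) (h : ¬(i = t ∧ j = s)) :
    pvF t (s + 1) i j = pvF t s i j := by
  unfold pvF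
  by_cases h1 : i < t ∨ (i = t ∧ j < s + 1) <;> by_cases h2 : i < t ∨ (i = t ∧ j < s) <;>
    simp only [h1, h2, ite_true, ite_false] <;> first | rfl | (exfalso; omega)

theorem pvStep (M N t s : Nat) (ht : t < M) (hs : s < N) :
    pvBody (pvState M N t s) (t : Int) (s : Int) = pvState M N t (s + 1) := by
  have htn : ((t : Int)).toNat = t := by omega
  have hsn : ((s : Int)).toNat = s := by omega
  have htn1 : ((t : Int) - 1).toNat = t - 1 := by omega
  have hsn1 : ((s : Int) - 1).toNat = s - 1 := by omega
  unfold pvBody pvState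
  simp only [htn, hsn, htn1, hsn1]
  by_cases ht0 : 0 < t <;> by_cases hs0 : 0 < s <;>
    simp only [ht0, hs0, Int.natCast_pos, ite_true, ite_false]
  · -- t > 0, s > 0
    have e1 : pvF t s t s = [0, 0] := by
      unfold pvF pvCell0
      rw [if_neg (by omega), if_neg (by omega)]
    have e2 : pvF t s (t - 1) s = pvCellF (t - 1) s := pvF_final _ _ _ _ (by omega)
    have e3 : pvF t s t (s - 1) = pvCellF t (s - 1) := pvF_final _ _ _ _ (by omega)
    rw [pvGet3_map M N (pvF t s) t s 0 ht hs,
        pvGet3_map M N (pvF t s) (t - 1) s 0 (by omega) hs,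
        pvGet3_map M N (pvF t s) (t - 1) s 1 (by omega) hs,
        pvSet3_map M N (pvF t s) t s 0 _ ht hs]
    set F1 : Nat → Nat → List Int := fun i' j' =>
      if i' = t ∧ j' = s then
        (pvF t s t s).set 0
          ((pvF t s t s).getD 0 0 + ((pvF t s (t - 1) s).getD 0 0 + (pvF t s (t - 1) s).getD 1 0))
      else pvF t s i' j' with hF1
    rw [pvGet3_map M N F1 t s 1 ht hs,
        pvGet3_map M N F1 t (s - 1) 0 ht (by omega),
        pvSet3_map M N F1 t s 1 _ ht hs]
    apply List.map_congr_left
    intro i hi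
    apply List.map_congr_left
    intro j hj
    by_cases hij : i = t ∧ j = s
    · obtain ⟨rfl, rfl⟩ := hij
      have hF1self : F1 i j
          = [(0 : Int) + ((((i - 1).choose j : Nat) : Int) + ((i - 1).choose (j - 1) : Nat)), 0] := by
        simp only [hF1, and_self, ite_true]
        rw [e1, e2]
        simp [pvCellF, if_neg (by omega : ¬ j = 0)]
      have hF1prev : F1 i (j - 1) = pvCellF i (j - 1) := by
        simp only [hF1, true_and]
        rw [if_neg (by omega : ¬ j - 1 = j)]
        exact e3
      rw [if_pos (⟨rfl, rfl⟩ : i = i ∧ j = j), hF1self, hF1prev,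
          pvF_final i (j + 1) i j (by omega)]
      simp only [pvCellF, if_neg (by omega : ¬ j = 0)]
      obtain ⟨t', rfl⟩ : ∃ t', i = t' + 1 := ⟨i - 1, by omega⟩
      obtain ⟨s', rfl⟩ : ∃ s', j = s' + 1 := ⟨j - 1, by omega⟩
      simp [Nat.choose_succ_succ]
      ring
    · have hF1o : F1 i j = pvF t s i j := by
        simp only [hF1]; rw [if_neg hij]
      rw [if_neg hij, hF1o, pvF_succ_of_ne t s i j hij]
  · -- t > 0, s = 0
    have hs' : s = 0 := by omega
    subst hs'
    have e1 : pvF t 0 t 0 = [0, 0] := by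
      unfold pvF pvCell0
      rw [if_neg (by omega), if_neg (by omega)]
    have e2 : pvF t 0 (t - 1) 0 = pvCellF (t - 1) 0 := pvF_final _ _ _ _ (by omega)
    rw [pvGet3_map M N (pvF t 0) t 0 0 ht hs,
        pvGet3_map M N (pvF t 0) (t - 1) 0 0 (by omega) hs,
        pvGet3_map M N (pvF t 0) (t - 1) 0 1 (by omega) hs,
        pvSet3_map M N (pvF t 0) t 0 0 _ ht hs]
    apply List.map_congr_left
    intro i hi
    apply List.map_congr_left
    intro j hj
    by_cases hij : i = t ∧ j = 0
    · obtain ⟨rfl, rfl⟩ := hij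
      rw [if_pos (⟨rfl, rfl⟩ : i = i ∧ (0 : Nat) = 0), e1, e2, pvF_final i 1 i 0 (by omega)]
      simp [pvCellF]
    · rw [if_neg hij, pvF_succ_of_ne t 0 i j hij]
  · -- t = 0, s > 0
    have ht' : t = 0 := by omega
    subst ht'
    have e1 : pvF 0 s 0 s = [0, 0] := by
      unfold pvF pvCell0
      rw [if_neg (by omega), if_neg (by omega)]
    have e3 : pvF 0 s 0 (s - 1) = pvCellF 0 (s - 1) := pvF_final _ _ _ _ (by omega)
    rw [pvGet3_map M N (pvF 0 s) 0 s 1 ht hs,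
        pvGet3_map M N (pvF 0 s) 0 (s - 1) 0 ht (by omega),
        pvSet3_map M N (pvF 0 s) 0 s 1 _ ht hs]
    apply List.map_congr_left
    intro i hi
    apply List.map_congr_left
    intro j hj
    by_cases hij : i = 0 ∧ j = s
    · obtain ⟨rfl, rfl⟩ := hij
      rw [if_pos (⟨rfl, rfl⟩ : (0 : Nat) = 0 ∧ j = j), e1, e3, pvF_final 0 (j + 1) 0 j (by omega)]
      simp [pvCellF, if_neg (by omega : ¬ j = 0), Nat.choose_eq_zero_of_lt (by omega : (0 : Nat) < j)]
    · rw [if_neg hij, pvF_succ_of_ne 0 s i j hij]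
  · -- t = 0, s = 0
    have ht' : t = 0 := by omega
    have hs' : s = 0 := by omega
    subst ht'; subst hs'
    apply List.map_congr_left
    intro i hi
    apply List.map_congr_left
    intro j hj
    by_cases hij : i = 0 ∧ j = 0
    · obtain ⟨rfl, rfl⟩ := hij
      rw [pvF_final 0 1 0 0 (by omega)]
      unfold pvF pvCell0
      rw [if_neg (by omega)]
      simp [pvCellF]
    · exact (pvF_succ_of_ne 0 0 i j hij).symm


theorem pvInner (M N t : Nat) (ht : t < M) : ∀ s, s ≤ N →
    (PySem.List.pyRange 0 (s : Int) 1).foldl (fun dp j => pvBody dp (t : Int) j)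
      (pvState M N t 0) = pvState M N t s := by
  intro s
  induction s with
  | zero =>
    intro _
    rw [show ((0 : Nat) : Int) = 0 from rfl, PySem.List.pyRange_one_eq_nil le_rfl]
    rfl
  | succ s ih =>
    intro hs
    rw [show ((s + 1 : Nat) : Int) = (s : Int) + 1 by push_cast; ring,
        PySem.List.pyRange_one_succ_right (by positivity), List.foldl_append,
        ih (by omega)]
    simpa using pvStep M N t s ht (by omega)

theorem pvRow (M N t : Nat) : pvState M N t N = pvState M N (t + 1) 0 := by
  apply pvState_congr
  intro i j hi hj
  unfold pvF
  have h : (i < t ∨ (i = t ∧ j < N)) ↔ (i < t + 1 ∨ (i = t + 1 ∧ j < 0)) := by omega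
  rw [if_congr h rfl rfl]

theorem pvOuter (M N : Nat) : ∀ t, t ≤ M →
    (PySem.List.pyRange 0 (t : Int) 1).foldl
      (fun dp i => (PySem.List.pyRange 0 (N : Int) 1).foldl (fun dp j => pvBody dp i j) dp)
      (pvState M N 0 0) = pvState M N t 0 := by
  intro t
  induction t with
  | zero =>
    intro _
    rw [show ((0 : Nat) : Int) = 0 from rfl, PySem.List.pyRange_one_eq_nil le_rfl]
    rfl
  | succ t ih =>
    intro ht
    rw [show ((t + 1 : Nat) : Int) = (t : Int) + 1 by push_cast; ring,
        PySem.List.pyRange_one_succ_right (by positivity), List.foldl_append,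
        ih (by omega)]
    simp only [List.foldl_cons, List.foldl_nil]
    rw [pvInner M N t (by omega) N le_rfl, pvRow]

theorem pvA_eq (m n : Int) (hm : 0 ≤ m) (hn : 0 ≤ n) :
    count_paths_no_consecutive_vertical m n
      = ((m.toNat.choose n.toNat : Nat) : Int)
        + (if n.toNat = 0 then 0 else ((m.toNat.choose (n.toNat - 1) : Nat) : Int)) := by
  simp only [count_paths_no_consecutive_vertical]
  set M := (m + 1).toNat with hMdef
  set N := (n + 1).toNat with hNdef
  have hM : ((M : Int)) = m + 1 := by omega
  have hN : ((N : Int)) = n + 1 := by omega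
  rw [pvInit_eq M N (by omega) (by omega), show m + 1 = (M : Int) from hM.symm,
      show n + 1 = (N : Int) from hN.symm]
  have hbody : (fun (dp : List (List (List Int))) (i : Int) =>
      (PySem.List.pyRange 0 (N : Int) 1).foldl (fun dp j =>
        let dp := if 0 < i then
            pvSet3 dp i.toNat j.toNat 0
              (pvGet3 dp i.toNat j.toNat 0 +
                (pvGet3 dp (i - 1).toNat j.toNat 0 + pvGet3 dp (i - 1).toNat j.toNat 1))
          else dp
        if 0 < j then
            pvSet3 dp i.toNat j.toNat 1
              (pvGet3 dp i.toNat j.toNat 1 + pvGet3 dp i.toNat (j - 1).toNat 0)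
          else dp) dp)
      = (fun dp i => (PySem.List.pyRange 0 (N : Int) 1).foldl (fun dp j => pvBody dp i j) dp) := rfl
  rw [hbody, pvOuter M N M le_rfl]
  unfold pvState
  rw [pvGet3_map M N (pvF M 0) m.toNat n.toNat 0 (by omega) (by omega),
      pvGet3_map M N (pvF M 0) m.toNat n.toNat 1 (by omega) (by omega),
      pvF_final M 0 m.toNat n.toNat (by omega)]
  by_cases h0 : n.toNat = 0 <;> simp [pvCellF, h0]

theorem pvAlt_loop (m : Int) (hm : 0 ≤ m) : ∀ K : Nat,
    (PySem.List.pyRange 0 (K : Int) 1).foldl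
      (fun res k => PySem.Int.floordiv (res * (m + 1 - k)) (k + 1)) 1
      = (((m.toNat + 1).choose K : Nat) : Int) := by
  intro K
  induction K with
  | zero =>
    rw [show ((0 : Nat) : Int) = 0 from rfl, PySem.List.pyRange_one_eq_nil le_rfl]
    simp
  | succ K ih =>
    rw [show ((K + 1 : Nat) : Int) = (K : Int) + 1 by push_cast; ring,
        PySem.List.pyRange_one_succ_right (by positivity), List.foldl_append, ih]
    simp only [List.foldl_cons, List.foldl_nil]
    set M' := m.toNat + 1 with hM'def
    have hM' : ((M' : Int)) = m + 1 := by omega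
    by_cases hK : K < M'
    · have hsub : m + 1 - (K : Int) = ((M' - K : Nat) : Int) := by omega
      rw [hsub, show ((M'.choose K : Nat) : Int) * ((M' - K : Nat) : Int)
            = (((M'.choose K * (M' - K) : Nat) : Nat) : Int) by push_cast; ring,
          ← Nat.choose_succ_right_eq,
          show ((K : Int) + 1) = (((K + 1 : Nat) : Nat) : Int) by push_cast; ring,
          PySem.Int.floordiv_natCast]
      rw [Nat.mul_div_cancel _ (by omega)]
    · have hz : ((M'.choose K : Nat) : Int) * (m + 1 - (K : Int)) = 0 := by
        by_cases hK' : K = M'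
        · rw [hK', show m + 1 - ((M' : Nat) : Int) = 0 by omega, mul_zero]
        · rw [Nat.choose_eq_zero_of_lt (by omega)]; simp
      rw [hz, PySem.Int.floordiv_eq_ediv_of_pos (by positivity), Int.zero_ediv,
          Nat.choose_eq_zero_of_lt (by omega)]
      simp

theorem pvAlt_eq (m n : Int) (hm : 0 ≤ m) (hn : 0 ≤ n) :
    count_paths_no_consecutive_vertical_alt m n = (((m.toNat + 1).choose n.toNat : Nat) : Int) := by
  unfold count_paths_no_consecutive_vertical_alt
  rw [show n = ((n.toNat : Nat) : Int) by omega]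
  exact pvAlt_loop m hm n.toNat


theorem pvCombine (a b : Nat) :
    ((a.choose b : Nat) : Int) + (if b = 0 then 0 else ((a.choose (b - 1) : Nat) : Int))
      = (((a + 1).choose b : Nat) : Int) := by
  cases b with
  | zero => simp
  | succ b' =>
    rw [if_neg (by omega)]
    simp [Nat.choose_succ_succ]
    ring

-- ===== VERDICT (by name: the statement is the Claim_ definition above) =====
theorem count_paths_no_consecutive_vertical_spec : Claim_equal_count_paths_no_consecutive_vertical := by
  intro m n _ hpre
  obtain ⟨hm, hn⟩ := hpre
  unfold Spec_count_paths_no_consecutive_vertical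
  rw [pvA_eq m n hm hn, pvAlt_eq m n hm hn]
  exact pvCombine m.toNat n.toNat
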